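-- pv_equiv track=rewrite | github.com/yfeng327/robinhood-ai-trading-bot | src/slider/kb_materializer.py | _insert_after_marker
-- ===== SOURCE A (Python) =====
-- def _insert_after_marker(content: str, marker: str, new_row: str) -> str:
--     """Insert a new row after the marker line (table header separator)."""
--     lines = content.split('\n')
--     result = []
--     marker_found = False
--     separator_found = False
--
--     for i, line in enumerate(lines):
--         result.append(line)
--
--         # Look for the marker line
--         if marker in line and not marker_found:
--             marker_found = True
--             continue
--
--         # After marker, look for the separator line (|---|---|...)
--         if marker_found and not separator_found and line.startswith('|') and '---' in line:
--             separator_found = True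
--             result.append(new_row)
--
--     return '\n'.join(result)
-- ===== SOURCE B (Python) =====
-- def _insert_after_marker(content: str, marker: str, new_row: str) -> str:
--     """Insert a new row after the marker line (table header separator)."""
--     lines = content.split('\n')
--     i = next((k for k, line in enumerate(lines) if marker in line), None)
--     if i is not None:
--         rel = next((k for k, line in enumerate(lines[i + 1:])
--                     if line.startswith('|') and '---' in line), None)
--         if rel is not None:
--             j = i + 1 + rel
--             lines = lines[:j + 1] + [new_row] + lines[j + 1:]
--     return '\n'.join(lines)
-- ===== Notes on version B (the rewrite author's own statement) =====
-- stated objective: simpler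
-- what changed: Replaced the single-pass state machine with two boolean flags by an explicit two-step index lookup (first line containing the marker, then first separator line strictly after it) followed by list splicing lines[:j+1] + [new_row] + lines[j+1:].
import Mathlib
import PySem

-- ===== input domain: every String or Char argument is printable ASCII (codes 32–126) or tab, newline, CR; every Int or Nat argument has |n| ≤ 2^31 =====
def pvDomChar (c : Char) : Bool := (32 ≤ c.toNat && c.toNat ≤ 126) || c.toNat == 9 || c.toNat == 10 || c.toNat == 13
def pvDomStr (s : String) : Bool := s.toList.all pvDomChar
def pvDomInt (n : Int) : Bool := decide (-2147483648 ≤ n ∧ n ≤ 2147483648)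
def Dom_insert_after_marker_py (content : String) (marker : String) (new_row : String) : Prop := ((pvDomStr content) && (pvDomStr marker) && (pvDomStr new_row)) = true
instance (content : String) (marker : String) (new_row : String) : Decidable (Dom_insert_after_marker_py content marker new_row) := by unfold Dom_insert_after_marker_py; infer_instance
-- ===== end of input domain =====

-- ===== PORT A =====
-- B replaces A's boolean-flag single pass by index lookup plus list splicing (simpler decomposition, same cost).

-- A's loop: walks the lines carrying the two flags (marker_found, separator_found) and the accumulated result.
def pvInsLoop (marker : String) (new_row : String) :
    List String → Bool → Bool → List String → List String
  | [], _, _, acc => acc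
  | l :: ls, mf, sf, acc =>
    let acc := acc ++ [l]
    if PySem.Str.isIn marker l && !mf then
      pvInsLoop marker new_row ls true sf acc
    else if mf && !sf && PySem.Str.startswith l "|" && PySem.Str.isIn "---" l then
      pvInsLoop marker new_row ls mf true (acc ++ [new_row])
    else
      pvInsLoop marker new_row ls mf sf acc

def insert_after_marker_py (content : String) (marker : String) (new_row : String) : String :=
  let lines := (PySem.Str.split? content "\n").getD []
  PySem.Str.join "\n" (pvInsLoop marker new_row lines false false [])

-- ===== PORT B =====
def insert_after_marker_py_alt (content : String) (marker : String) (new_row : String) : String :=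
  let lines := (PySem.Str.split? content "\n").getD []
  let lines :=
    match lines.findIdx? (fun l => PySem.Str.isIn marker l) with
    | none => lines
    | some i =>
      match (lines.drop (i + 1)).findIdx?
          (fun l => PySem.Str.startswith l "|" && PySem.Str.isIn "---" l) with
      | none => lines
      | some rel =>
        let j := i + 1 + rel
        lines.take (j + 1) ++ [new_row] ++ lines.drop (j + 1)
  PySem.Str.join "\n" lines

-- ===== PRECONDITION & SPEC =====
def Spec_insert_after_marker_py (content : String) (marker : String) (new_row : String) (out : String) : Prop := out = insert_after_marker_py_alt content marker new_row
instance (content : String) (marker : String) (new_row : String) (out : String) : Decidable (Spec_insert_after_marker_py content marker new_row out) := by unfold Spec_insert_after_marker_py; infer_instance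

-- ===== CLAIM (what is proved, stated in full; the proofs are below) =====
def Claim_equal_insert_after_marker_py : Prop := ∀ (content : String) (marker : String) (new_row : String), Dom_insert_after_marker_py content marker new_row → Spec_insert_after_marker_py content marker new_row (insert_after_marker_py content marker new_row)

-- ===== LEMMAS AND PROOFS =====

-- After both flags are set the loop just copies the remaining lines.
theorem pvInsLoop_done (marker new_row : String) (ls : List String) (acc : List String) :
    pvInsLoop marker new_row ls true true acc = acc ++ ls := by
  induction ls generalizing acc with
  | nil => simp [pvInsLoop]
  | cons l ls ih =>
    simp only [pvInsLoop, Bool.not_true, Bool.and_false, Bool.false_and, Bool.false_eq_true, if_false, ih]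
    simp

-- With the marker found, the loop inserts new_row after the first separator line (if any).
theorem pvInsLoop_sep (marker new_row : String) (ls : List String) (acc : List String) :
    pvInsLoop marker new_row ls true false acc =
      match ls.findIdx? (fun l => PySem.Str.startswith l "|" && PySem.Str.isIn "---" l) with
      | none => acc ++ ls
      | some r => acc ++ ls.take (r + 1) ++ [new_row] ++ ls.drop (r + 1) := by
  induction ls generalizing acc with
  | nil => simp [pvInsLoop]
  | cons l ls ih =>
    rw [List.findIdx?_cons]
    simp only [pvInsLoop, Bool.not_true, Bool.and_false, Bool.not_false, Bool.true_and,
      Bool.false_eq_true, if_false]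
    by_cases hS : (PySem.Str.startswith l "|" && PySem.Str.isIn "---" l) = true
    · rw [if_pos hS, if_pos hS, pvInsLoop_done]
      simp
    · rw [if_neg hS, if_neg hS, ih]
      cases h : ls.findIdx? (fun l => PySem.Str.startswith l "|" && PySem.Str.isIn "---" l) with
      | none => simp
      | some r => simp [List.take_succ_cons, List.drop_succ_cons]

-- From the start, the loop first locates the marker line, then behaves as pvInsLoop_sep.
theorem pvInsLoop_mark (marker new_row : String) (ls : List String) (acc : List String) :
    pvInsLoop marker new_row ls false false acc =
      match ls.findIdx? (fun l => PySem.Str.isIn marker l) with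
      | none => acc ++ ls
      | some i => pvInsLoop marker new_row (ls.drop (i + 1)) true false (acc ++ ls.take (i + 1)) := by
  induction ls generalizing acc with
  | nil => simp [pvInsLoop]
  | cons l ls ih =>
    rw [List.findIdx?_cons]
    simp only [pvInsLoop, Bool.not_false, Bool.and_true, Bool.false_and,
      Bool.false_eq_true, if_false]
    by_cases hM : PySem.Str.isIn marker l = true
    · rw [if_pos hM, if_pos hM]
      simp
    · rw [if_neg hM, if_neg hM, ih]
      cases h : ls.findIdx? (fun l => PySem.Str.isIn marker l) with
      | none => simp
      | some i => simp [List.take_succ_cons, List.drop_succ_cons]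

-- Core equivalence over an arbitrary list of lines.
theorem pvIns_core (marker new_row : String) (lines : List String) :
    pvInsLoop marker new_row lines false false [] =
      (match lines.findIdx? (fun l => PySem.Str.isIn marker l) with
       | none => lines
       | some i =>
         match (lines.drop (i + 1)).findIdx?
             (fun l => PySem.Str.startswith l "|" && PySem.Str.isIn "---" l) with
         | none => lines
         | some rel =>
           lines.take (i + 1 + rel + 1) ++ [new_row] ++ lines.drop (i + 1 + rel + 1)) := by
  rw [pvInsLoop_mark]
  cases hM : lines.findIdx? (fun l => PySem.Str.isIn marker l) with
  | none => simp
  | some i =>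
    simp only []
    rw [pvInsLoop_sep]
    cases hS : (lines.drop (i + 1)).findIdx?
        (fun l => PySem.Str.startswith l "|" && PySem.Str.isIn "---" l) with
    | none => simp
    | some rel =>
      simp only [List.nil_append]
      have ht : List.take ((i + 1) + (rel + 1)) lines
          = List.take (i + 1) lines ++ List.take (rel + 1) (List.drop (i + 1) lines) :=
        List.take_add
      have hd : List.drop ((i + 1) + (rel + 1)) lines
          = List.drop (rel + 1) (List.drop (i + 1) lines) := List.drop_drop.symm
      rw [show i + 1 + rel + 1 = (i + 1) + (rel + 1) from by omega, ht, hd]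

-- ===== VERDICT (by name: the statement is the Claim_ definition above) =====
theorem insert_after_marker_py_spec : Claim_equal_insert_after_marker_py := by
  intro content marker new_row _
  unfold Spec_insert_after_marker_py insert_after_marker_py insert_after_marker_py_alt
  simp only []
  rw [pvIns_core]
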